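-- pv_equiv track=rewrite | github.com/MarvellinusVincent/CS61A | Lab/lab01/digit_pos_match.py | digit_pos_match
-- ===== SOURCE A (Python) =====
-- def digit_pos_match(n, k):
--     """
--     >>> digit_pos_match(980, 0) # .Case 1
--     True
--     >>> digit_pos_match(980, 2) # .Case 2
--     False
--     >>> digit_pos_match(98276, 2) # .Case 3
--     True
--     >>> digit_pos_match(98276, 3) # .Case 4
--     False
--     """
--     "*** YOUR CODE HERE ***"
--     count = 0
--     while n != 0:
--         if n % 10 == count and count == k:
--             return True
--         count += 1
--         n = n // 10
--     return False
-- ===== SOURCE B (Python) =====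
-- def digit_pos_match(n, k):
--     # a decimal digit is 0..9, so a position k outside that range can never match
--     if k < 0 or k > 9:
--         return False
--     q = n // 10 ** k
--     return q != 0 and q % 10 == k
-- ===== Notes on version B (the rewrite author's own statement) =====
-- stated objective: simpler
-- what changed: Replaces A's digit-by-digit while loop with a closed-form extraction of the digit at position k (q = n // 10**k; the position exists iff q != 0 and its digit is q % 10), plus a k < 0 guard.
-- outside the precondition, e.g. on digit_pos_match(-7, 0): A does not finish within the time limit, B returns False; on digit_pos_match(-1, 9): A returns True, B returns True
import Mathlib
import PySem

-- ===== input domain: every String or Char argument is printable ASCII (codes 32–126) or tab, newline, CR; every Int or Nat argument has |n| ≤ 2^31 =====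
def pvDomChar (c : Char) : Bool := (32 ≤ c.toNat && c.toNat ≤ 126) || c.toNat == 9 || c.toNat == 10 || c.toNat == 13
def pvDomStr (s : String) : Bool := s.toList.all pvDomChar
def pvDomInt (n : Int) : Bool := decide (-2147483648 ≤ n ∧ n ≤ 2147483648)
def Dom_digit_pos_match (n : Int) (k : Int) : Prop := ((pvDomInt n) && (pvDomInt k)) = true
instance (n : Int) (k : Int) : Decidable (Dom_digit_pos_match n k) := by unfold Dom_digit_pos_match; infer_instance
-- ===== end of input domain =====

-- B replaces A's digit-walking while loop by a closed-form extraction of the digit at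
-- position k (q = n // 10**k): simpler, no loop.

-- ===== PORT A =====
-- A's while loop, totalized with fuel; fuel n.natAbs + 1 exceeds the number of
-- iterations for every n ≥ 0 (the inputs Pre_ admits), so on Pre_ this is exactly A.
def pvDigitLoopA : Nat → Int → Int → Int → Bool
  | 0, _, _, _ => false
  | fuel + 1, n, count, k =>
    if n ≠ 0 then
      if PySem.Int.mod n 10 == count && count == k then true
      else pvDigitLoopA fuel (PySem.Int.floordiv n 10) (count + 1) k
    else false

def digit_pos_match (n : Int) (k : Int) : Bool :=
  pvDigitLoopA (n.natAbs + 1) n 0 k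

-- ===== PORT B =====
def digit_pos_match_alt (n : Int) (k : Int) : Bool :=
  if k < 0 ∨ 9 < k then false
  else
    let q := PySem.Int.floordiv n (10 ^ k.toNat)
    q != 0 && PySem.Int.mod q 10 == k

-- ===== PRECONDITION & SPEC =====
-- Pre_ excludes n < 0: there A's loop variable 'n // 10' never reaches 0, so the
-- while loop runs forever (no return) except on accidental matches where it exits
-- early with True; the natural domain of this digit function is n ≥ 0.
def Pre_digit_pos_match (n : Int) (k : Int) : Prop := 0 ≤ n
instance (n : Int) (k : Int) : Decidable (Pre_digit_pos_match n k) := by unfold Pre_digit_pos_match; infer_instance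
def pvWitness_digit_pos_match : Int × Int := (980, 0)

def Spec_digit_pos_match (n : Int) (k : Int) (out : Bool) : Prop := out = digit_pos_match_alt n k
instance (n : Int) (k : Int) (out : Bool) : Decidable (Spec_digit_pos_match n k out) := by unfold Spec_digit_pos_match; infer_instance

-- ===== CLAIM (what is proved, stated in full; the proofs are below) =====
def Claim_equal_digit_pos_match : Prop := ∀ (n : Int) (k : Int), Dom_digit_pos_match n k → Pre_digit_pos_match n k → Spec_digit_pos_match n k (digit_pos_match n k)

-- ===== LEMMAS AND PROOFS =====

-- Closed form of A's loop started at counter c on a nonnegative n = m.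
def pvShift (m : Nat) (c k : Int) : Bool :=
  if k < c then false
  else decide (m / 10 ^ (k - c).toNat ≠ 0 ∧ ((m / 10 ^ (k - c).toNat % 10 : Nat) : Int) = k)

lemma pvShift_zero (c k : Int) : pvShift 0 c k = false := by
  simp [pvShift, Nat.zero_div]

lemma pvDigitLoopA_eq_shift : ∀ (fuel : Nat) (m : Nat) (c k : Int), m < fuel →
    pvDigitLoopA fuel (m : Int) c k = pvShift m c k := by
  intro fuel
  induction fuel with
  | zero => intro m c k h; omega
  | succ f ih =>
    intro m c k h
    rcases Nat.eq_zero_or_pos m with hm | hm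
    · subst hm; simp [pvDigitLoopA, pvShift_zero]
    · have hm0 : ((m : Int)) ≠ 0 := by omega
      have hdiv : PySem.Int.floordiv (m : Int) 10 = ((m / 10 : Nat) : Int) := by
        exact_mod_cast PySem.Int.floordiv_natCast m 10
      have hmod : PySem.Int.mod (m : Int) 10 = ((m % 10 : Nat) : Int) := by
        exact_mod_cast PySem.Int.mod_natCast m 10
      have hrec : pvDigitLoopA f ((m / 10 : Nat) : Int) (c + 1) k = pvShift (m / 10) (c + 1) k :=
        ih (m / 10) (c + 1) k (by
          have := Nat.div_lt_self hm (by norm_num : 1 < 10); omega)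
      show (if (m : Int) ≠ 0 then _ else false) = _
      rw [if_pos hm0, hdiv, hmod, hrec]
      by_cases hck : c = k
      · subst hck
        by_cases hd : ((m % 10 : Nat) : Int) = c
        · -- immediate return True
          rw [if_pos (by simp [hd])]
          rw [pvShift, if_neg (by omega)]
          symm
          rw [decide_eq_true_iff]
          refine ⟨?_, ?_⟩ <;> simp [Nat.div_one] <;> omega
        · -- digit mismatch at position c = k: recursion returns false (k < c + 1)
          have hd' : ¬ ((m : Int) % 10 = c) := by push_cast at hd; exact hd
          rw [if_neg (by simp [hd'])]
          rw [pvShift, if_pos (by omega)]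
          rw [pvShift, if_neg (by omega)]
          symm
          simp only [Int.sub_self, Int.toNat_zero, pow_zero, Nat.div_one]
          rw [decide_eq_false_iff_not]
          rintro ⟨-, h2⟩
          exact hd h2
      · -- c ≠ k: condition false, compare shifted closed forms
        rw [if_neg (by simp [hck])]
        by_cases hlt : k < c
        · rw [pvShift, if_pos (by omega), pvShift, if_pos hlt]
        · have hgt : c + 1 ≤ k := by omega
          rw [pvShift, if_neg (by omega), pvShift, if_neg hlt]
          have he : (k - c).toNat = (k - (c + 1)).toNat + 1 := by omega
          have hq : m / 10 ^ (k - c).toNat = m / 10 / 10 ^ (k - (c + 1)).toNat := by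
            rw [he, Nat.div_div_eq_div_mul, pow_succ, Nat.mul_comm]
          rw [hq]

-- B's closed form equals pvShift at c = 0, for n ≥ 0.
lemma alt_eq_shift (n : Int) (k : Int) (hn : 0 ≤ n) :
    digit_pos_match_alt n k = pvShift n.toNat 0 k := by
  obtain ⟨m, rfl⟩ : ∃ m : Nat, n = (m : Int) := ⟨n.toNat, by omega⟩
  rw [Int.toNat_natCast]
  unfold digit_pos_match_alt pvShift
  by_cases hk0 : k < 0
  · rw [if_pos (Or.inl hk0), if_pos hk0]
  by_cases hk9 : 9 < k
  · -- a digit is < 10, so pvShift is false too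
    rw [if_pos (Or.inr hk9), if_neg hk0]
    symm
    rw [decide_eq_false_iff_not]
    rintro ⟨-, h2⟩
    have : m / 10 ^ (k - 0).toNat % 10 < 10 := Nat.mod_lt _ (by norm_num)
    omega
  · rw [if_neg (by tauto), if_neg hk0]
    show (PySem.Int.floordiv (m : Int) (10 ^ k.toNat) != 0
        && PySem.Int.mod (PySem.Int.floordiv (m : Int) (10 ^ k.toNat)) 10 == k) = _
    have hcast : (10 : Int) ^ k.toNat = ((10 ^ k.toNat : Nat) : Int) := by push_cast; ring
    rw [hcast]
    have hdiv : PySem.Int.floordiv ((m : Nat) : Int) ((10 ^ k.toNat : Nat) : Int)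
        = ((m / 10 ^ k.toNat : Nat) : Int) := PySem.Int.floordiv_natCast _ _
    rw [hdiv]
    have hmod : PySem.Int.mod ((m / 10 ^ k.toNat : Nat) : Int) 10
        = ((m / 10 ^ k.toNat % 10 : Nat) : Int) := by
      exact_mod_cast PySem.Int.mod_natCast (m / 10 ^ k.toNat) 10
    rw [hmod]
    have he : (k - 0).toNat = k.toNat := by omega
    rw [he]
    generalize m / 10 ^ k.toNat = q
    generalize ((q % 10 : Nat) : Int) = b
    by_cases h1 : q = 0 <;> by_cases h2 : b = k <;> simp [h1, h2]

-- ===== VERDICT (by name: the statement is the Claim_ definition above) =====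
theorem digit_pos_match_spec : Claim_equal_digit_pos_match := by
  intro n k _ hpre
  have hn0 : 0 ≤ n := hpre
  unfold Spec_digit_pos_match digit_pos_match
  rw [alt_eq_shift n k hn0]
  obtain ⟨m, rfl⟩ : ∃ m : Nat, n = (m : Int) := ⟨n.toNat, by omega⟩
  rw [Int.natAbs_natCast, Int.toNat_natCast]
  exact pvDigitLoopA_eq_shift (m + 1) m 0 k (Nat.lt_succ_self _)
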